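-- pv_equiv track=rewrite | github.com/milartkiller-byte/programming-labs-2026 | lab1_1/lab1_dop/lab1_dop.py | calculate_inventory
-- ===== SOURCE A (Python) =====
-- def calculate_inventory(matrix, K, E_max):
--     """
--     Функція розраховує результати обходу складу.
--     Повертає: (сума_товарів_K, чи_вистачило_енергії, кількість_підзарядок)
--     """
--     if not matrix or not matrix[0]:
--         return 0, True, 0
--
--     N = len(matrix)
--     M = len(matrix[0])
--     total_cells = N * M
--
--     r, c = 0, 0
--     up_right = True
--
--     current_energy = E_max
--     recharges = 0
--     goods_sum_K = 0
--
--     for step in range(total_cells):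
--         if step < K:
--             goods_sum_K += matrix[r][c]
--
--         if step == total_cells - 1:
--             break
--
--         cost = 0
--         if up_right:
--             if c == M - 1:
--                 r += 1
--                 up_right = False
--                 cost = 1
--             elif r == 0:
--                 c += 1
--                 up_right = False
--                 cost = 1
--             else:
--                 r -= 1
--                 c += 1
--                 cost = 2
--         else:
--             if r == N - 1:
--                 c += 1
--                 up_right = True
--                 cost = 1
--             elif c == 0:
--                 r += 1
--                 up_right = True
--                 cost = 1
--             else:
--                 r += 1
--                 c -= 1
--                 cost = 2
--
--         if current_energy < cost:
--             recharges += 1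
--             current_energy = E_max
--
--         current_energy -= cost
--
--     is_enough_energy = (recharges == 0)
--     return goods_sum_K, is_enough_energy, recharges
-- ===== SOURCE B (Python) =====
-- def calculate_inventory(matrix, K, E_max):
--     """Diagonal decomposition: build the zigzag visiting order per anti-diagonal,
--     then one pass for the K-sum and one pass over consecutive-cell distances
--     for the energy/recharge bookkeeping."""
--     if not matrix or not matrix[0]:
--         return 0, True, 0
--
--     N, M = len(matrix), len(matrix[0])
--
--     path = []
--     for d in range(N + M - 1):
--         lo = max(0, d - M + 1)
--         hi = min(d, N - 1)
--         rows = reversed(range(lo, hi + 1)) if d % 2 == 0 else range(lo, hi + 1)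
--         path.extend((r, d - r) for r in rows)
--
--     k = min(max(K, 0), N * M)
--     goods_sum_K = sum(matrix[r][c] for r, c in path[:k])
--
--     energy, recharges = E_max, 0
--     for (r1, c1), (r2, c2) in zip(path, path[1:]):
--         cost = abs(r2 - r1) + abs(c2 - c1)
--         if energy < cost:
--             recharges += 1
--             energy = E_max
--         energy -= cost
--
--     return goods_sum_K, recharges == 0, recharges
-- ===== Notes on version B (the rewrite author's own statement) =====
-- stated objective: alternative
-- what changed: A simulates the zigzag walk cell by cell with a mutable (r,c,up_right) state machine inside one loop; B first constructs the visiting order per anti-diagonal (alternating orientation), then computes the K-cell sum and the recharge count in two separate passes over that order, deriving each move's cost as the Manhattan distance of consecutive cells.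
import Mathlib
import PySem

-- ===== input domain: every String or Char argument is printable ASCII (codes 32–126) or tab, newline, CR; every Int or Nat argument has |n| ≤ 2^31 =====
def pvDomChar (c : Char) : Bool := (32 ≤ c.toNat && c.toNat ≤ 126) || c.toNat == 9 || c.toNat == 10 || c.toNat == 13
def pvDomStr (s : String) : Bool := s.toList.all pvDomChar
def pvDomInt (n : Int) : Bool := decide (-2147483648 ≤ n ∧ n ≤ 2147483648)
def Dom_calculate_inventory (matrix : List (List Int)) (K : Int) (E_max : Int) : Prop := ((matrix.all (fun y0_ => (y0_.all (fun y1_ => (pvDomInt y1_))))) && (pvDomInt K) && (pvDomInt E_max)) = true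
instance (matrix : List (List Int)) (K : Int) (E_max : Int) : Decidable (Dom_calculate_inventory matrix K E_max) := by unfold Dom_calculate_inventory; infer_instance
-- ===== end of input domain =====

-- B rebuilds the zigzag visiting order diagonal by diagonal and then replays the sum
-- and the energy bookkeeping in two independent passes (objective: alternative, same cost).

-- ===== PORT A =====
-- matrix[r][c]; total under Pre_ (indices produced by the traversal are in range there)
def cellAt (matrix : List (List Int)) (r c : Int) : Int :=
  PySem.List.pyGetD (PySem.List.pyGetD matrix r []) c 0

-- the 'for step in range(total_cells)' loop of A, fuel = number of remaining iterations
def aLoop (matrix : List (List Int)) (K E_max N M total : Int) :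
    Nat → Int → Int → Int → Bool → Int → Int → Int → Int × Bool × Int
  | 0, _, _, _, _, _, recharges, gsum => (gsum, recharges == 0, recharges)
  | fuel + 1, step, r, c, up, energy, recharges, gsum =>
    let gsum := if step < K then gsum + cellAt matrix r c else gsum
    if step == total - 1 then (gsum, recharges == 0, recharges)
    else
      let m : Int × Int × Bool × Int :=
        if up then
          if c == M - 1 then (r + 1, c, false, 1)
          else if r == 0 then (r, c + 1, false, 1)
          else (r - 1, c + 1, up, 2)
        else
          if r == N - 1 then (r, c + 1, true, 1)
          else if c == 0 then (r + 1, c, true, 1)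
          else (r + 1, c - 1, up, 2)
      let cost := m.2.2.2
      let er : Int × Int :=
        if energy < cost then (recharges + 1, E_max) else (recharges, energy)
      aLoop matrix K E_max N M total fuel (step + 1) m.1 m.2.1 m.2.2.1 (er.2 - cost) er.1 gsum

def calculate_inventory (matrix : List (List Int)) (K : Int) (E_max : Int) : Int × Bool × Int :=
  match matrix with
  | [] => (0, true, 0)
  | row0 :: _ =>
    if row0 = [] then (0, true, 0)
    else
      let N := PySem.List.len matrix
      let M := PySem.List.len row0
      let total := N * M
      aLoop matrix K E_max N M total total.toNat 0 0 0 true E_max 0 0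

-- ===== PORT B =====
-- rows of anti-diagonal d, in visiting order (even d: bottom-left → top-right)
def bDiagRows (N M d : Int) : List Int :=
  let lo := max 0 (d - M + 1)
  let hi := min d (N - 1)
  if PySem.Int.mod d 2 == 0 then (PySem.List.pyRange lo (hi + 1) 1).reverse
  else PySem.List.pyRange lo (hi + 1) 1

def bPath (N M : Int) : List (Int × Int) :=
  (PySem.List.pyRange 0 (N + M - 1) 1).flatMap
    (fun d => (bDiagRows N M d).map (fun r => (r, d - r)))

-- one energy step for a consecutive pair of cells
def eStep (E_max : Int) (st : Int × Int) (p : (Int × Int) × (Int × Int)) : Int × Int :=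
  let cost := |p.2.1 - p.1.1| + |p.2.2 - p.1.2|
  let st' := if st.1 < cost then (E_max, st.2 + 1) else st
  (st'.1 - cost, st'.2)

def calculate_inventory_alt (matrix : List (List Int)) (K : Int) (E_max : Int) : Int × Bool × Int :=
  match matrix with
  | [] => (0, true, 0)
  | row0 :: _ =>
    if row0 = [] then (0, true, 0)
    else
      let N := PySem.List.len matrix
      let M := PySem.List.len row0
      let path := bPath N M
      let k := min (max K 0) (N * M)
      let goods := ((path.take k.toNat).map (fun rc => cellAt matrix rc.1 rc.2)).sum
      let st := (path.zip path.tail).foldl (eStep E_max) (E_max, 0)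
      (goods, st.2 == 0, st.2)

-- ===== PRECONDITION & SPEC =====
-- arithmetic position of cell (r, c) in the zigzag visiting order of an N×M grid
-- (cells on earlier anti-diagonals, plus the offset within diagonal r+c)
def zigPos (N M r c : Int) : Int :=
  (∑ e ∈ Finset.range (r + c).toNat, (min ((e : Int)) (N - 1) - max 0 ((e : Int) - M + 1) + 1))
  + (if (r + c) % 2 = 0 then min (r + c) (N - 1) - r else r - max 0 (r + c - M + 1))

-- Pre_ excludes exactly the inputs on which A raises IndexError: some row i is shorter
-- than the first row and one of its missing cells (i, c) lies among the first
-- min(max(K,0), N*M) cells of the zigzag order, so A's sum loop indexes past that row.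
def Pre_calculate_inventory (matrix : List (List Int)) (K : Int) (E_max : Int) : Prop :=
  matrix.headD [] = [] ∨
  ∀ i < matrix.length, ∀ c < (matrix.headD []).length,
    (matrix.getD i []).length ≤ c →
    min (max K 0) ((matrix.length : Int) * (((matrix.headD []).length : Nat) : Int))
      ≤ zigPos (matrix.length : Int) (((matrix.headD []).length : Nat) : Int) (i : Int) (c : Int)
instance (matrix : List (List Int)) (K : Int) (E_max : Int) : Decidable (Pre_calculate_inventory matrix K E_max) := by
  unfold Pre_calculate_inventory; infer_instance

def pvWitness_calculate_inventory : List (List Int) × Int × Int := ([[1, 2], [3, 4]], 3, 2)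

def Spec_calculate_inventory (matrix : List (List Int)) (K : Int) (E_max : Int) (out : Int × Bool × Int) : Prop := out = calculate_inventory_alt matrix K E_max
instance (matrix : List (List Int)) (K : Int) (E_max : Int) (out : Int × Bool × Int) : Decidable (Spec_calculate_inventory matrix K E_max out) := by unfold Spec_calculate_inventory; infer_instance

-- ===== CLAIM (what is proved, stated in full; the proofs are below) =====
def Claim_equal_calculate_inventory : Prop := ∀ (matrix : List (List Int)) (K : Int) (E_max : Int), Dom_calculate_inventory matrix K E_max → Pre_calculate_inventory matrix K E_max → Spec_calculate_inventory matrix K E_max (calculate_inventory matrix K E_max)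

-- ===== LEMMAS AND PROOFS =====

-- next cell of the zigzag, as a pure function of the position (A's up_right flag
-- always equals "r+c is even", see aLoop_eq_path)
def stepRC (N M r c : Int) : Int × Int :=
  if (r + c) % 2 = 0 then
    if c = M - 1 then (r + 1, c)
    else if r = 0 then (r, c + 1)
    else (r - 1, c + 1)
  else
    if r = N - 1 then (r, c + 1)
    else if c = 0 then (r + 1, c)
    else (r + 1, c - 1)

-- path obtained by iterating stepRC
def iterP (N M : Int) : Nat → Int × Int → List (Int × Int)
  | 0, _ => []
  | n + 1, rc => rc :: iterP N M n (stepRC N M rc.1 rc.2)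

-- first visited cell of diagonal d
def firstRow (N M d : Int) : Int :=
  if d % 2 = 0 then min d (N - 1) else max 0 (d - M + 1)

lemma even_run (N M d : Int) (hd : d % 2 = 0) (hdN : d ≤ N + M - 2)
    (hN : 1 ≤ N) (hM : 1 ≤ M) (hd0 : 0 ≤ d) :
    ∀ (t : Nat) (m : Nat) (r : Int), r = max 0 (d - M + 1) + t → r ≤ min d (N - 1) →
    iterP N M (t + 1 + m) (r, d - r) =
      ((PySem.List.pyRange (max 0 (d - M + 1)) (r + 1) 1).reverse.map (fun r => (r, d - r))) ++
       iterP N M m (stepRC N M (max 0 (d - M + 1)) (d - max 0 (d - M + 1))) := by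
  intro t
  induction t with
  | zero =>
    intro m r hr hle
    have hrlo : r = max 0 (d - M + 1) := by omega
    subst hrlo
    have h1 : (0 + 1 + m) = m + 1 := by omega
    rw [h1, PySem.List.pyRange_one_singleton]
    simp [iterP]
  | succ t ih =>
    intro m r hr hle
    have hlo : max 0 (d - M + 1) ≤ r - 1 := by omega
    have hstep : stepRC N M r (d - r) = (r - 1, d - (r - 1)) := by
      unfold stepRC
      have h2 : r + (d - r) = d := by ring
      rw [h2, if_pos hd, if_neg (by omega : ¬ (d - r = M - 1)), if_neg (by omega : ¬ (r = 0))]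
      simp only [Prod.mk.injEq]; exact ⟨trivial, by ring⟩
    have h1 : (t + 1 + 1 + m) = (t + 1 + m) + 1 := by omega
    rw [h1]
    show (r, d - r) :: iterP N M (t + 1 + m) (stepRC N M r (d - r)) = _
    rw [hstep, ih m (r - 1) (by omega) (by omega)]
    have h3 : r - 1 + 1 = r := by ring
    rw [h3, PySem.List.pyRange_one_succ_right (by omega : max 0 (d - M + 1) ≤ r)]
    simp

lemma odd_run (N M d : Int) (hd : d % 2 ≠ 0) (hdN : d ≤ N + M - 2)
    (hN : 1 ≤ N) (hM : 1 ≤ M) (hd0 : 0 ≤ d) :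
    ∀ (t : Nat) (m : Nat) (r : Int), r = min d (N - 1) - t → max 0 (d - M + 1) ≤ r →
    iterP N M (t + 1 + m) (r, d - r) =
      ((PySem.List.pyRange r (min d (N - 1) + 1) 1).map (fun r => (r, d - r))) ++
       iterP N M m (stepRC N M (min d (N - 1)) (d - min d (N - 1))) := by
  intro t
  induction t with
  | zero =>
    intro m r hr hle
    have hrhi : r = min d (N - 1) := by omega
    subst hrhi
    have h1 : (0 + 1 + m) = m + 1 := by omega
    rw [h1, PySem.List.pyRange_one_singleton]
    simp [iterP]
  | succ t ih =>
    intro m r hr hle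
    have hstep : stepRC N M r (d - r) = (r + 1, d - (r + 1)) := by
      unfold stepRC
      have h2 : r + (d - r) = d := by ring
      rw [h2, if_neg hd, if_neg (by omega : ¬ (r = N - 1)), if_neg (by omega : ¬ (d - r = 0))]
      simp only [Prod.mk.injEq]; exact ⟨trivial, by ring⟩
    have h1 : (t + 1 + 1 + m) = (t + 1 + m) + 1 := by omega
    rw [h1]
    show (r, d - r) :: iterP N M (t + 1 + m) (stepRC N M r (d - r)) = _
    rw [hstep, ih m (r + 1) (by omega) (by omega)]
    rw [PySem.List.pyRange_one_cons (by omega : r < min d (N - 1) + 1)]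
    simp

-- the step out of the last cell of diagonal d lands on the first cell of diagonal d+1
lemma link (N M d : Int) (hN : 1 ≤ N) (hM : 1 ≤ M) (hd0 : 0 ≤ d) (hdN : d ≤ N + M - 3) :
    stepRC N M (if d % 2 = 0 then max 0 (d - M + 1) else min d (N - 1))
      (d - (if d % 2 = 0 then max 0 (d - M + 1) else min d (N - 1))) =
    (firstRow N M (d + 1), d + 1 - firstRow N M (d + 1)) := by
  unfold stepRC firstRow
  by_cases hd : d % 2 = 0
  · have hd1 : ¬ ((d + 1) % 2 = 0) := by omega
    have ha : max 0 (d - M + 1) + (d - max 0 (d - M + 1)) = d := by ring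
    simp only [if_pos hd, if_neg hd1, ha]
    split_ifs <;> simp only [Prod.mk.injEq] <;> constructor <;> omega
  · have hd1 : (d + 1) % 2 = 0 := by omega
    have ha : min d (N - 1) + (d - min d (N - 1)) = d := by ring
    simp only [if_neg hd, if_pos hd1, ha]
    split_ifs <;> simp only [Prod.mk.injEq] <;> constructor <;> omega

-- one diagonal, in terms of iterP
lemma diag_block (N M d : Int) (hN : 1 ≤ N) (hM : 1 ≤ M) (hd0 : 0 ≤ d) (hdN : d ≤ N + M - 2) (m : Nat) :
    iterP N M ((bDiagRows N M d).length + m) (firstRow N M d, d - firstRow N M d) =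
      (bDiagRows N M d).map (fun r => (r, d - r)) ++
        iterP N M m (stepRC N M (if d % 2 = 0 then max 0 (d - M + 1) else min d (N - 1))
          (d - (if d % 2 = 0 then max 0 (d - M + 1) else min d (N - 1)))) := by
  have hlohi : max 0 (d - M + 1) ≤ min d (N - 1) := by omega
  have hmod : PySem.Int.mod d 2 = d % 2 := PySem.Int.mod_eq_emod_of_pos (by omega)
  by_cases hd : d % 2 = 0
  · have key := even_run N M d hd hdN hN hM hd0
      (min d (N - 1) - max 0 (d - M + 1)).toNat m (min d (N - 1)) (by omega) (by omega)
    simp only [bDiagRows, firstRow, hmod, hd, if_pos, beq_self_eq_true,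
      List.length_reverse, PySem.List.length_pyRange_one]
    have hlen : (min d (N - 1) + 1 - max 0 (d - M + 1)).toNat + m =
        (min d (N - 1) - max 0 (d - M + 1)).toNat + 1 + m := by omega
    rw [hlen]
    exact key
  · have key := odd_run N M d hd hdN hN hM hd0
      (min d (N - 1) - max 0 (d - M + 1)).toNat m (max 0 (d - M + 1)) (by omega) (by omega)
    have hbeq : (PySem.Int.mod d 2 == 0) = false := by
      rw [hmod]; exact beq_eq_false_iff_ne.mpr hd
    simp only [bDiagRows, firstRow, hbeq, hd, if_false, Bool.false_eq_true,
      PySem.List.length_pyRange_one]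
    have hlen : (min d (N - 1) + 1 - max 0 (d - M + 1)).toNat + m =
        (min d (N - 1) - max 0 (d - M + 1)).toNat + 1 + m := by omega
    rw [hlen]
    exact key

lemma chain (N M : Int) (hN : 1 ≤ N) (hM : 1 ≤ M) :
    ∀ (j : Nat) (d : Int), 0 ≤ d → d = N + M - 2 - j →
    (PySem.List.pyRange d (N + M - 1) 1).flatMap (fun d => (bDiagRows N M d).map (fun r => (r, d - r))) =
      iterP N M ((PySem.List.pyRange d (N + M - 1) 1).flatMap (fun d => (bDiagRows N M d).map (fun r => (r, d - r)))).length
        (firstRow N M d, d - firstRow N M d) := by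
  intro j
  induction j with
  | zero =>
    intro d hd0 hdeq
    have h1 : N + M - 1 = d + 1 := by omega
    rw [h1, PySem.List.pyRange_one_singleton]
    simp only [List.flatMap_cons, List.flatMap_nil, List.append_nil, List.length_map]
    have key := diag_block N M d hN hM hd0 (by omega) 0
    simp only [Nat.add_zero, iterP, List.append_nil] at key
    exact key.symm
  | succ j ih =>
    intro d hd0 hdeq
    rw [PySem.List.pyRange_one_cons (by omega : d < N + M - 1)]
    simp only [List.flatMap_cons, List.length_append, List.length_map]
    have ihd := ih (d + 1) (by omega) (by omega)
    have key := diag_block N M d hN hM hd0 (by omega)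
      ((PySem.List.pyRange (d + 1) (N + M - 1) 1).flatMap
        (fun d => (bDiagRows N M d).map (fun r => (r, d - r)))).length
    rw [link N M d hN hM hd0 (by omega)] at key
    rw [key, ← ihd]

lemma len_bPath (N M : Int) (hN : 1 ≤ N) (hM : 1 ≤ M) :
    ((bPath N M).length : Int) = N * M := by
  have ind_sum : ∀ (n : Nat) (a b : Int),
      (∑ i ∈ Finset.range n, (if a ≤ (i : Int) ∧ (i : Int) ≤ b then (1 : Int) else 0))
        = max 0 (min b ((n : Int) - 1) - max a 0 + 1) := by
    intro n a b
    induction n with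
    | zero => simp only [Finset.range_zero, Finset.sum_empty, Nat.cast_zero]; omega
    | succ n ih =>
      rw [Finset.sum_range_succ, ih]
      by_cases h : a ≤ (n : Int) ∧ (n : Int) ≤ b <;> simp [h] <;> push_cast <;> omega
  have hlen : ((bPath N M).length : Int)
      = ∑ k ∈ Finset.range (N + M - 1).toNat,
          (min ((k : Int)) (N - 1) + 1 - max 0 ((k : Int) - M + 1)) := by
    have cast_sum_range : ∀ (n : Nat) (F : Nat → Nat),
        ((((List.range n).map F).sum : Nat) : Int) = ∑ i ∈ Finset.range n, (F i : Int) := by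
      intro n F
      rw [show ((List.range n).map F).sum = ∑ i ∈ Finset.range n, F i from rfl]
      exact Nat.cast_sum _ _
    unfold bPath
    rw [List.length_flatMap, PySem.List.pyRange_one]
    rw [List.map_map]
    rw [cast_sum_range]
    have h0 : N + M - 1 - 0 = N + M - 1 := by ring
    rw [h0]
    apply Finset.sum_congr rfl
    intro k hk
    have hk' : (k : Int) ≤ N + M - 2 := by
      simp only [Finset.mem_range] at hk; omega
    simp only [Function.comp_apply, List.length_map, bDiagRows]
    split
    · rw [List.length_reverse, PySem.List.length_pyRange_one]; omega
    · rw [PySem.List.length_pyRange_one]; omega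
  rw [hlen]
  have hmid : ∀ (r k : Int), ((k - M + 1 ≤ r ∧ r ≤ k) ↔ (r ≤ k ∧ k ≤ r + M - 1)) := by
    intro r k; omega
  calc ∑ k ∈ Finset.range (N + M - 1).toNat, (min ((k : Int)) (N - 1) + 1 - max 0 ((k : Int) - M + 1))
      = ∑ k ∈ Finset.range (N + M - 1).toNat, ∑ r ∈ Finset.range N.toNat,
          (if (k : Int) - M + 1 ≤ (r : Int) ∧ (r : Int) ≤ (k : Int) then (1 : Int) else 0) := by
        apply Finset.sum_congr rfl
        intro k hk
        have hk' : (k : Int) ≤ N + M - 2 := by simp only [Finset.mem_range] at hk; omega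
        rw [ind_sum]
        omega
    _ = ∑ r ∈ Finset.range N.toNat, ∑ k ∈ Finset.range (N + M - 1).toNat,
          (if (r : Int) ≤ (k : Int) ∧ (k : Int) ≤ (r : Int) + M - 1 then (1 : Int) else 0) := by
        rw [Finset.sum_comm]
        simp only [hmid]
    _ = ∑ r ∈ Finset.range N.toNat, M := by
        apply Finset.sum_congr rfl
        intro r hr
        have hr' : (r : Int) ≤ N - 1 := by simp only [Finset.mem_range] at hr; omega
        rw [ind_sum]
        have hr0 : (0 : Int) ≤ (r : Int) := by positivity
        omega
    _ = N * M := by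
        rw [Finset.sum_const, nsmul_eq_mul]
        have : ((N.toNat : Int)) = N := by omega
        rw [Finset.card_range, this]

lemma bPath_eq_iterP (N M : Int) (hN : 1 ≤ N) (hM : 1 ≤ M) :
    bPath N M = iterP N M (N * M).toNat (0, 0) := by
  have h := chain N M hN hM (N + M - 2).toNat 0 (le_refl 0) (by omega)
  have hb : bPath N M = iterP N M (bPath N M).length (firstRow N M 0, 0 - firstRow N M 0) := h
  have hf : firstRow N M 0 = 0 := by
    unfold firstRow
    rw [if_pos (by omega : (0 : Int) % 2 = 0)]
    omega
  have hl : (bPath N M).length = (N * M).toNat := by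
    have := len_bPath N M hN hM; omega
  rw [hb, hl, hf]
  norm_num

lemma move_spec (N M r c : Int) :
    (if (r + c) % 2 = 0 then
        if c = M - 1 then (r + 1, c, false, (1 : Int))
        else if r = 0 then (r, c + 1, false, 1)
        else (r - 1, c + 1, decide ((r + c) % 2 = 0), 2)
      else
        if r = N - 1 then (r, c + 1, true, 1)
        else if c = 0 then (r + 1, c, true, 1)
        else (r + 1, c - 1, decide ((r + c) % 2 = 0), 2))
    = ((stepRC N M r c).1, (stepRC N M r c).2,
       decide (((stepRC N M r c).1 + (stepRC N M r c).2) % 2 = 0),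
       |(stepRC N M r c).1 - r| + |(stepRC N M r c).2 - c|) := by
  unfold stepRC
  split_ifs with h1 h2 h3 h4 h5
  · simp only [Prod.mk.injEq]; refine ⟨trivial, trivial, ?_, ?_⟩
    · rw [eq_comm, decide_eq_false_iff_not]; omega
    · rw [show r + 1 - r = (1:Int) from by ring, show c - c = (0:Int) from by ring]; norm_num
  · simp only [Prod.mk.injEq]; refine ⟨trivial, trivial, ?_, ?_⟩
    · rw [eq_comm, decide_eq_false_iff_not]; omega
    · rw [show r - r = (0:Int) from by ring, show c + 1 - c = (1:Int) from by ring]; norm_num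
  · simp only [Prod.mk.injEq]; refine ⟨trivial, trivial, ?_, ?_⟩
    · rw [decide_eq_decide]; omega
    · rw [show r - 1 - r = (-1:Int) from by ring, show c + 1 - c = (1:Int) from by ring]; norm_num
  · simp only [Prod.mk.injEq]; refine ⟨trivial, trivial, ?_, ?_⟩
    · rw [eq_comm, decide_eq_true_eq]; omega
    · rw [show r - r = (0:Int) from by ring, show c + 1 - c = (1:Int) from by ring]; norm_num
  · simp only [Prod.mk.injEq]; refine ⟨trivial, trivial, ?_, ?_⟩
    · rw [eq_comm, decide_eq_true_eq]; omega
    · rw [show r + 1 - r = (1:Int) from by ring, show c - c = (0:Int) from by ring]; norm_num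
  · simp only [Prod.mk.injEq]; refine ⟨trivial, trivial, ?_, ?_⟩
    · rw [decide_eq_decide]; omega
    · rw [show r + 1 - r = (1:Int) from by ring, show c - 1 - c = (-1:Int) from by ring]; norm_num

lemma eStep_eq (E_max en rech cost : Int) (x y : Int × Int)
    (hc : |y.1 - x.1| + |y.2 - x.2| = cost) :
    eStep E_max (en, rech) (x, y)
      = ((if en < cost then E_max else en) - cost, if en < cost then rech + 1 else rech) := by
  unfold eStep
  simp only [hc]
  split_ifs <;> rfl

lemma take_cons_clamp (g : Int × Int → Int) (x : Int × Int) (p : List (Int × Int)) (K step : Int) (f : Nat) :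
    (((x :: p).take ((min (max (K - step) 0) ((f : Int) + 1)).toNat)).map g).sum
      = (if step < K then g x else 0)
        + ((p.take ((min (max (K - (step + 1)) 0) (f : Int)).toNat)).map g).sum := by
  by_cases hK : step < K
  · have h1 : (min (max (K - step) 0) ((f : Int) + 1)).toNat
        = (min (max (K - (step + 1)) 0) (f : Int)).toNat + 1 := by omega
    rw [h1, List.take_succ_cons]
    simp [hK]
  · have h0 : (min (max (K - step) 0) ((f : Int) + 1)).toNat = 0 := by omega
    have h1 : (min (max (K - (step + 1)) 0) (f : Int)).toNat = 0 := by omega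
    rw [h0, h1]
    simp [hK]

lemma aLoop_eq_path (matrix : List (List Int)) (K E_max N M total : Int) :
    ∀ (fuel : Nat) (step r c en rech gsum : Int), step + (fuel : Int) = total →
    aLoop matrix K E_max N M total fuel step r c (decide ((r + c) % 2 = 0)) en rech gsum =
      (gsum + (((iterP N M fuel (r, c)).take (min (max (K - step) 0) (fuel : Int)).toNat).map
          (fun rc => cellAt matrix rc.1 rc.2)).sum,
       (((iterP N M fuel (r, c)).zip (iterP N M fuel (r, c)).tail).foldl (eStep E_max) (en, rech)).2 == 0,
       (((iterP N M fuel (r, c)).zip (iterP N M fuel (r, c)).tail).foldl (eStep E_max) (en, rech)).2) := by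
  intro fuel
  induction fuel with
  | zero =>
    intro step r c en rech gsum h
    simp [aLoop, iterP]
  | succ f ih =>
    intro step r c en rech gsum h
    by_cases hf : f = 0
    · subst hf
      have hbreak : (step == total - 1) = true := by simp; omega
      simp only [aLoop, iterP, hbreak, if_true]
      by_cases hK : step < K
      · rw [show (min (max (K - step) 0) ((0 + 1 : Nat) : Int)).toNat = 1 from by omega]
        simp [hK]
      · rw [show (min (max (K - step) 0) ((0 + 1 : Nat) : Int)).toNat = 0 from by omega]
        simp [hK]
    · have hbreak : (step == total - 1) = false := by
        rw [beq_eq_false_iff_ne]; omega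
      simp only [aLoop, hbreak, Bool.false_eq_true, if_false, decide_eq_true_eq, beq_iff_eq]
      rw [move_spec N M r c]
      simp only [apply_ite (Prod.snd (α := Int) (β := Int)), apply_ite (Prod.fst (α := Int) (β := Int))]
      obtain ⟨g, rfl⟩ := Nat.exists_eq_succ_of_ne_zero hf
      rw [ih (step + 1) (stepRC N M r c).1 (stepRC N M r c).2 _ _ _ (by push_cast at h; omega)]
      simp only [iterP, Prod.mk.eta, List.zip_cons_cons, List.tail_cons, List.foldl_cons]
      rw [eStep_eq E_max en rech (|(stepRC N M r c).1 - r| + |(stepRC N M r c).2 - c|) (r, c) (stepRC N M r c) rfl]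
      rw [show ((g + 1 + 1 : Nat) : Int) = ((g + 1 : Nat) : Int) + 1 from by push_cast; ring]
      rw [take_cons_clamp]
      refine Prod.ext ?_ rfl
      by_cases hK : step < K <;> simp [hK] <;> ring

-- ===== VERDICT (by name: the statement is the Claim_ definition above) =====
theorem calculate_inventory_spec : Claim_equal_calculate_inventory := by
  intro matrix K E_max hdom hpre
  unfold Spec_calculate_inventory
  cases matrix with
  | nil => rfl
  | cons row0 rest =>
    by_cases hrow : row0 = []
    · simp [calculate_inventory, calculate_inventory_alt, hrow]
    · have hM : 1 ≤ ((row0.length : Nat) : Int) := by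
        have : row0.length ≠ 0 := by simpa [List.length_eq_zero_iff] using hrow
        omega
      have hN : 1 ≤ (((row0 :: rest).length : Nat) : Int) := by simp
      have hT : (0 : Int) ≤ ((row0 :: rest).length : Int) * (row0.length : Int) := by positivity
      simp only [calculate_inventory, calculate_inventory_alt, if_neg hrow, PySem.List.len_eq]
      have h := aLoop_eq_path (row0 :: rest) K E_max ((row0 :: rest).length : Int) (row0.length : Int)
        (((row0 :: rest).length : Int) * (row0.length : Int))
        ((((row0 :: rest).length : Int) * (row0.length : Int)).toNat) 0 0 0 E_max 0 0 (by omega)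
      rw [show decide (((0 : Int) + 0) % 2 = 0) = true from by decide] at h
      rw [h, ← bPath_eq_iterP ((row0 :: rest).length : Int) (row0.length : Int) hN hM]
      rw [show (min (max (K - 0) 0) ((((((row0 :: rest).length : Int) * (row0.length : Int)).toNat : Nat)) : Int)).toNat
            = (min (max K 0) (((row0 :: rest).length : Int) * (row0.length : Int))).toNat from by omega]
      rw [zero_add]
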